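-- pv_equiv track=rewrite | github.com/Salyel/TP_Optim_Continue | DUMOULIN_LEMOAL_OPTIM_CONTINUE/traitementDeDonnees.py | separationBaseApprentissageFolds
-- ===== SOURCE A (Python) =====
-- def separationBaseApprentissageFolds(donnees_formatees, int_validation, nb_folds):
--     i = 0
--     base_apprentissage = []
--     while (i < len(donnees_formatees)):
--         if (i < len(donnees_formatees)/nb_folds*int_validation or i > len(donnees_formatees)/nb_folds*(int_validation+1)):
--             base_apprentissage.append(donnees_formatees[i])
--         i += 1
--
--     return base_apprentissage
-- ===== SOURCE B (Python) =====
-- import math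
--
-- def separationBaseApprentissageFolds(donnees_formatees, int_validation, nb_folds):
--     n = len(donnees_formatees)
--     lo = n / nb_folds * int_validation
--     hi = n / nb_folds * (int_validation + 1)
--     a = max(0, math.ceil(lo))
--     b = max(a, math.floor(hi) + 1)
--     return donnees_formatees[:a] + donnees_formatees[b:]
-- ===== Notes on version B (the rewrite author's own statement) =====
-- stated objective: simpler
-- what changed: Replaces the per-index while-loop membership test with a closed-form computation of the two integer cut points (ceil/floor of the same float fold bounds) and returns the concatenation of two slices.
-- outside the precondition, e.g. on separationBaseApprentissageFolds([], 0, 0): A returns [], B raises ZeroDivisionError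
import Mathlib
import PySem

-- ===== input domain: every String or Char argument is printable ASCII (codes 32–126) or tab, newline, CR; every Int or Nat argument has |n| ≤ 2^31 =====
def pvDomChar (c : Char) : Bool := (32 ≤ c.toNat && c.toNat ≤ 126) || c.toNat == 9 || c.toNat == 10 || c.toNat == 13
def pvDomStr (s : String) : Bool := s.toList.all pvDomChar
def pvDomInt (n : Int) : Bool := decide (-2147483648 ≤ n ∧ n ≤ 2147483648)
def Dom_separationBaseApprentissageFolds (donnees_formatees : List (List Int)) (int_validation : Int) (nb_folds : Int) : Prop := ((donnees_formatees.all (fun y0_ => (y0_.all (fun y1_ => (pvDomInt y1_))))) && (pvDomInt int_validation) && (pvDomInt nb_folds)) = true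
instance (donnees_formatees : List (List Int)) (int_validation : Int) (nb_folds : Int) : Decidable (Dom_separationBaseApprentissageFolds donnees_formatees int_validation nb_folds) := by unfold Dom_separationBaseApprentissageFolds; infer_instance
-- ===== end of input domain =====

-- B computes the two fold cut points once (ceil/floor of the same float bounds A tests
-- against) and returns two slice copies instead of testing every index in a while loop.

-- ===== PORT A =====
-- Python float arithmetic is modelled exactly: pvRound64 is IEEE-754 binary64
-- round-to-nearest-even of a rational (exact for the non-zero normal range reached on Dom,
-- and for 0), modelled over ℚ with the fractional-part case split of the rounding rule;
-- both Pythons compute the two correctly-rounded operations fl(fl(len/nb) * v), and ints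
-- |v| ≤ 2^31 convert to float exactly.
def pvExpA (m : ℚ) : Int :=
  if (2:ℚ)^(((Nat.log2 m.num.natAbs : Int) - (Nat.log2 m.den : Int)) + 1) ≤ m
  then ((Nat.log2 m.num.natAbs : Int) - (Nat.log2 m.den : Int)) + 1
  else if (2:ℚ)^((Nat.log2 m.num.natAbs : Int) - (Nat.log2 m.den : Int)) ≤ m
  then (Nat.log2 m.num.natAbs : Int) - (Nat.log2 m.den : Int)
  else (Nat.log2 m.num.natAbs : Int) - (Nat.log2 m.den : Int) - 1

def pvMantA (m : ℚ) : Int :=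
  let t : ℚ := m * (2:ℚ)^(52 - pvExpA m)
  let n0 : Int := ⌊t⌋
  if (1:ℚ)/2 < t - n0 then n0 + 1
  else if t - n0 < (1:ℚ)/2 then n0
  else if n0 % 2 = 0 then n0 else n0 + 1

def pvRound64 (q : ℚ) : ℚ :=
  if q = 0 then 0 else (if q < 0 then -1 else 1) * (pvMantA |q| : ℚ) * (2:ℚ)^(pvExpA |q| - 52)

-- the float value of the Python expression len(d)/nb_folds*w, as A's port computes it
def pvFoldBound (L nb w : Int) : ℚ := pvRound64 (pvRound64 ((L:ℚ) / (nb:ℚ)) * (w:ℚ))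

def separationBaseApprentissageFolds (donnees_formatees : List (List Int)) (int_validation : Int) (nb_folds : Int) : List (List Int) :=
  (List.range donnees_formatees.length).foldl
    (fun base_apprentissage (i : Nat) =>
      if (i:ℚ) < pvFoldBound donnees_formatees.length nb_folds int_validation
          ∨ (i:ℚ) > pvFoldBound donnees_formatees.length nb_folds (int_validation + 1)
      then base_apprentissage ++ [donnees_formatees.getD i []]
      else base_apprentissage) []

-- ===== PORT B =====
-- B's port carries its own independent (also exact) model of binary64 rounding, stated in
-- pure integer arithmetic over the numerator/denominator pair: ⌊t + 1/2⌋ computed by Nat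
-- division with the half-way tie broken to even; pvRndB_eq_pvRound64 (below the claim
-- block) proves the two models agree.
def pvHalfUp (a b : Nat) : Nat := (2*a + b) / (2*b)
def pvTie (a b : Nat) : Bool := (2*a + b) % (2*b) == 0

def pvTestB (p q : Nat) : Bool :=
  if 0 ≤ (Nat.log2 p : Int) - (Nat.log2 q : Int)
  then decide (q * 2^(((Nat.log2 p : Int) - (Nat.log2 q : Int)).toNat) ≤ p)
  else decide (q ≤ p * 2^((-((Nat.log2 p : Int) - (Nat.log2 q : Int))).toNat))

def pvExpB (p q : Nat) : Int :=
  if pvTestB p q then (Nat.log2 p : Int) - (Nat.log2 q : Int)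
  else (Nat.log2 p : Int) - (Nat.log2 q : Int) - 1

def pvNumB (p q : Nat) : Nat := if 0 ≤ 52 - pvExpB p q then p * 2^((52 - pvExpB p q).toNat) else p
def pvDenB (p q : Nat) : Nat := if 0 ≤ 52 - pvExpB p q then q else q * 2^((-(52 - pvExpB p q)).toNat)

def pvMantB (p q : Nat) : Nat :=
  let n0 := pvHalfUp (pvNumB p q) (pvDenB p q)
  if pvTie (pvNumB p q) (pvDenB p q) && n0 % 2 == 1 then n0 - 1 else n0

def pvRndB (x : ℚ) : ℚ :=
  if x = 0 then 0 else
    let v : ℚ := (pvMantB x.num.natAbs x.den : ℚ) * (2:ℚ)^(pvExpB x.num.natAbs x.den - 52)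
    if x < 0 then -v else v

-- the float value of len(d)/nb_folds*w, as B's port computes it
def pvCutB (L nb w : Int) : ℚ := pvRndB (pvRndB ((L:ℚ) / (nb:ℚ)) * (w:ℚ))

def separationBaseApprentissageFolds_alt (donnees_formatees : List (List Int)) (int_validation : Int) (nb_folds : Int) : List (List Int) :=
  let n : Int := donnees_formatees.length
  let lo : ℚ := pvCutB n nb_folds int_validation
  let hi : ℚ := pvCutB n nb_folds (int_validation + 1)
  let a : Int := max 0 ⌈lo⌉
  let b : Int := max a (⌊hi⌋ + 1)
  PySem.List.slice donnees_formatees none (some a) ++ PySem.List.slice donnees_formatees (some b) none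

-- ===== PRECONDITION & SPEC =====
-- Pre_ excludes exactly nb_folds = 0: A raises ZeroDivisionError there whenever the list is
-- non-empty, and on the empty list A only returns [] because its loop body (and the division)
-- never runs; B's bound computation raises ZeroDivisionError on all of it.
def Pre_separationBaseApprentissageFolds (donnees_formatees : List (List Int)) (int_validation : Int) (nb_folds : Int) : Prop := nb_folds ≠ 0
instance (donnees_formatees : List (List Int)) (int_validation : Int) (nb_folds : Int) : Decidable (Pre_separationBaseApprentissageFolds donnees_formatees int_validation nb_folds) := by unfold Pre_separationBaseApprentissageFolds; infer_instance

def pvWitness_separationBaseApprentissageFolds : List (List Int) × Int × Int := ([[1], [2], [3], [4]], 1, 2)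

def Spec_separationBaseApprentissageFolds (donnees_formatees : List (List Int)) (int_validation : Int) (nb_folds : Int) (out : List (List Int)) : Prop := out = separationBaseApprentissageFolds_alt donnees_formatees int_validation nb_folds
instance (donnees_formatees : List (List Int)) (int_validation : Int) (nb_folds : Int) (out : List (List Int)) : Decidable (Spec_separationBaseApprentissageFolds donnees_formatees int_validation nb_folds out) := by unfold Spec_separationBaseApprentissageFolds; infer_instance

-- ===== CLAIM (what is proved, stated in full; the proofs are below) =====
def Claim_equal_separationBaseApprentissageFolds : Prop := ∀ (donnees_formatees : List (List Int)) (int_validation : Int) (nb_folds : Int), Dom_separationBaseApprentissageFolds donnees_formatees int_validation nb_folds → Pre_separationBaseApprentissageFolds donnees_formatees int_validation nb_folds → Spec_separationBaseApprentissageFolds donnees_formatees int_validation nb_folds (separationBaseApprentissageFolds donnees_formatees int_validation nb_folds)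

-- ===== LEMMAS AND PROOFS =====
lemma pv_floor_nat_div (a b : Nat) : ⌊(a:ℚ)/(b:ℚ)⌋ = ((a / b : Nat) : Int) := by
  rw [Rat.floor_natCast_div_natCast, Int.natCast_div]

lemma pv_halfup (a b : Nat) (hb : b ≠ 0) :
    pvHalfUp a b = a / b + (if b ≤ 2 * (a % b) then 1 else 0) := by
  have h : b * (a/b) + a % b = a := Nat.div_add_mod a b
  have h2 : 2*a + b = (2*b) * (a/b) + (2*(a % b) + b) := by
    have hm : (2*b)*(a/b) = 2*(b*(a/b)) := by ring
    omega
  unfold pvHalfUp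
  rw [h2, Nat.mul_add_div (by omega)]
  have hr : a % b < b := Nat.mod_lt _ (by omega)
  by_cases hc : b ≤ 2 * (a % b)
  · rw [if_pos hc]
    have : (2*(a % b) + b) / (2*b) = 1 :=
      Nat.div_eq_of_lt_le (by omega) (by omega)
    omega
  · rw [if_neg hc]
    have : (2*(a % b) + b) / (2*b) = 0 := Nat.div_eq_of_lt (by omega)
    omega

lemma pv_tie (a b : Nat) (hb : b ≠ 0) : pvTie a b = true ↔ 2 * (a % b) = b := by
  have h : b * (a/b) + a % b = a := Nat.div_add_mod a b
  have h2 : 2*a + b = (2*b) * (a/b) + (2*(a % b) + b) := by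
    have hm : (2*b)*(a/b) = 2*(b*(a/b)) := by ring
    omega
  have hr : a % b < b := Nat.mod_lt _ (by omega)
  unfold pvTie
  rw [h2, Nat.mul_add_mod]
  constructor
  · intro h
    have h0 : (2*(a % b) + b) % (2*b) = 0 := by simpa using h
    rcases (Nat.dvd_of_mod_eq_zero h0) with ⟨k, hk⟩
    rcases Nat.lt_or_ge k 2 with hk2 | hk2
    · interval_cases k <;> omega
    · have : 2*b*2 ≤ 2*b*k := Nat.mul_le_mul_left _ hk2
      omega
  · intro h
    simp [show 2*(a % b) + b = 2*b by omega]

lemma pv_round_nat (a b : Nat) (hb : b ≠ 0) :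
    ((if pvTie a b && (pvHalfUp a b) % 2 == 1 then pvHalfUp a b - 1 else pvHalfUp a b : Nat) : Int)
      = (if (1:ℚ)/2 < (a:ℚ)/(b:ℚ) - (⌊(a:ℚ)/(b:ℚ)⌋:ℚ) then ⌊(a:ℚ)/(b:ℚ)⌋ + 1
         else if (a:ℚ)/(b:ℚ) - (⌊(a:ℚ)/(b:ℚ)⌋:ℚ) < (1:ℚ)/2 then ⌊(a:ℚ)/(b:ℚ)⌋
         else if ⌊(a:ℚ)/(b:ℚ)⌋ % 2 = 0 then ⌊(a:ℚ)/(b:ℚ)⌋ else ⌊(a:ℚ)/(b:ℚ)⌋ + 1) := by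
  have hbq : (0:ℚ) < (b:ℚ) := by exact_mod_cast Nat.pos_of_ne_zero hb
  have hr : a % b < b := Nat.mod_lt _ (Nat.pos_of_ne_zero hb)
  have hcast : (b:ℚ)*((a/b : Nat):ℚ) + ((a % b : Nat):ℚ) = (a:ℚ) := by
    exact_mod_cast congrArg (Nat.cast : Nat → ℚ) (Nat.div_add_mod a b)
  have hfrac : (a:ℚ)/(b:ℚ) - ((a/b : Nat):ℚ) = ((a % b : Nat):ℚ)/(b:ℚ) := by
    rw [eq_div_iff (ne_of_gt hbq), sub_mul, div_mul_cancel₀ _ (ne_of_gt hbq)]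
    linarith [hcast]
  have hQ : ((((a/b : Nat):Int)):ℚ) = ((a/b : Nat):ℚ) := by push_cast; rfl
  rw [pv_floor_nat_div, hQ, hfrac]
  have hcmp1 : ((1:ℚ)/2 < ((a % b : Nat):ℚ)/(b:ℚ)) ↔ b < 2*(a % b) := by
    rw [div_lt_div_iff₀ (by norm_num) hbq, one_mul]
    norm_cast
    omega
  have hcmp2 : (((a % b : Nat):ℚ)/(b:ℚ) < (1:ℚ)/2) ↔ 2*(a % b) < b := by
    rw [div_lt_div_iff₀ hbq (by norm_num)]
    norm_cast
    omega
  rcases Nat.lt_trichotomy (2*(a % b)) b with h | h | h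
  · have hn0 : pvHalfUp a b = a / b := by
      rw [pv_halfup a b hb, if_neg (by omega)]
      omega
    have ht : pvTie a b = false := by
      rcases Bool.eq_false_or_eq_true (pvTie a b) with htt | hf
      · exact absurd ((pv_tie a b hb).mp htt) (by omega)
      · exact hf
    simp only [ht, Bool.false_and, Bool.false_eq_true, if_false, hn0]
    have hA : ¬ ((1:ℚ)/2 < ((a % b : Nat):ℚ)/(b:ℚ)) := by rw [hcmp1]; omega
    have hB : ((a % b : Nat):ℚ)/(b:ℚ) < (1:ℚ)/2 := by rw [hcmp2]; omega
    rw [if_neg hA, if_pos hB]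
  · have hn0 : pvHalfUp a b = a / b + 1 := by
      rw [pv_halfup a b hb, if_pos (by omega)]
    have ht : pvTie a b = true := (pv_tie a b hb).mpr h
    have hfr : ((a % b : Nat):ℚ)/(b:ℚ) = (1:ℚ)/2 := by
      rw [div_eq_div_iff (ne_of_gt hbq) (by norm_num)]
      exact_mod_cast (by omega : (a % b) * 2 = 1 * b)
    simp only [ht, Bool.true_and, hn0, beq_iff_eq]
    have hA : ¬ ((1:ℚ)/2 < ((a % b : Nat):ℚ)/(b:ℚ)) := by rw [hfr]; exact lt_irrefl _
    have hB : ¬ (((a % b : Nat):ℚ)/(b:ℚ) < (1:ℚ)/2) := by rw [hfr]; exact lt_irrefl _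
    rw [if_neg hA, if_neg hB]
    by_cases hpar : (a / b) % 2 = 0
    · rw [if_pos (show (a/b+1) % 2 = 1 by omega),
          if_pos (show ((a/b : Nat):Int) % 2 = 0 by omega)]
      omega
    · rw [if_neg (show ¬ (a/b+1) % 2 = 1 by omega),
          if_neg (show ¬ ((a/b : Nat):Int) % 2 = 0 by omega)]
      omega
  · have hn0 : pvHalfUp a b = a / b + 1 := by
      rw [pv_halfup a b hb, if_pos (by omega)]
    have ht : pvTie a b = false := by
      rcases Bool.eq_false_or_eq_true (pvTie a b) with htt | hf
      · exact absurd ((pv_tie a b hb).mp htt) (by omega)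
      · exact hf
    simp only [ht, Bool.false_and, Bool.false_eq_true, if_false, hn0]
    have hA : (1:ℚ)/2 < ((a % b : Nat):ℚ)/(b:ℚ) := by rw [hcmp1]; omega
    rw [if_pos hA]
    push_cast
    ring

lemma pv_scale_eq (p q : Nat) (_hp : p ≠ 0) (_hq : q ≠ 0) (s : Int) :
    ((if 0 ≤ s then p * 2^(s.toNat) else p : Nat):ℚ) / ((if 0 ≤ s then q else q * 2^((-s).toNat) : Nat):ℚ)
      = (p:ℚ)/(q:ℚ) * (2:ℚ)^s := by
  by_cases hs : 0 ≤ s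
  · rw [if_pos hs, if_pos hs]
    have h2 : ((2:ℚ))^(s.toNat) = (2:ℚ)^s := by
      rw [← zpow_natCast (2:ℚ) s.toNat, Int.toNat_of_nonneg hs]
    push_cast
    rw [h2]
    ring
  · rw [if_neg hs, if_neg hs]
    have hns : 0 ≤ -s := by omega
    have h2 : ((2:ℚ))^((-s).toNat) = (2:ℚ)^(-s) := by
      rw [← zpow_natCast (2:ℚ) (-s).toNat, Int.toNat_of_nonneg hns]
    push_cast
    rw [h2, div_mul_eq_div_div, zpow_neg, div_eq_mul_inv ((p:ℚ)/(q:ℚ)), inv_inv]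

lemma pv_lt_two_pow (p q : Nat) (_hp : p ≠ 0) (hq : q ≠ 0) :
    (p:ℚ)/(q:ℚ) < (2:ℚ)^(((Nat.log2 p : Int) - (Nat.log2 q : Int)) + 1) := by
  have hqpos : (0:ℚ) < (q:ℚ) := by exact_mod_cast Nat.pos_of_ne_zero hq
  have h1 : (p:ℚ) < (2:ℚ)^(Nat.log2 p + 1 : Nat) := by exact_mod_cast Nat.lt_log2_self
  have h2 : ((2:ℚ))^(Nat.log2 q : Nat) ≤ (q:ℚ) := by exact_mod_cast Nat.log2_self_le hq
  have h2pos : (0:ℚ) < ((2:ℚ))^(Nat.log2 q : Nat) := by positivity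
  have step : (p:ℚ)/(q:ℚ) < ((2:ℚ)^(Nat.log2 p + 1 : Nat)) / ((2:ℚ))^(Nat.log2 q : Nat) := by
    calc (p:ℚ)/(q:ℚ) ≤ (p:ℚ)/((2:ℚ))^(Nat.log2 q : Nat) := by
          apply div_le_div_of_nonneg_left (by positivity) h2pos h2
      _ < ((2:ℚ)^(Nat.log2 p + 1 : Nat)) / ((2:ℚ))^(Nat.log2 q : Nat) := by
          apply div_lt_div_of_pos_right h1 h2pos
  calc (p:ℚ)/(q:ℚ) < ((2:ℚ)^(Nat.log2 p + 1 : Nat)) / ((2:ℚ))^(Nat.log2 q : Nat) := step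
    _ = (2:ℚ)^(((Nat.log2 p : Int) - (Nat.log2 q : Int)) + 1) := by
        rw [← zpow_natCast (2:ℚ) (Nat.log2 p + 1), ← zpow_natCast (2:ℚ) (Nat.log2 q),
            ← zpow_sub₀ (by norm_num : (2:ℚ) ≠ 0)]
        congr 1
        push_cast
        ring

lemma pv_test_iff (p q : Nat) (_hp : p ≠ 0) (hq : q ≠ 0) (k : Int) :
    ((if 0 ≤ k then decide (q * 2^(k.toNat) ≤ p) else decide (q ≤ p * 2^((-k).toNat))) = true)
      ↔ (2:ℚ)^k ≤ (p:ℚ)/(q:ℚ) := by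
  have hqpos : (0:ℚ) < (q:ℚ) := by exact_mod_cast Nat.pos_of_ne_zero hq
  by_cases hk : 0 ≤ k
  · rw [if_pos hk, decide_eq_true_iff, le_div_iff₀ hqpos]
    have h2 : ((2:ℚ))^(k.toNat) = (2:ℚ)^k := by
      rw [← zpow_natCast (2:ℚ) k.toNat, Int.toNat_of_nonneg hk]
    constructor
    · intro hle
      have h' : (q:ℚ) * (2:ℚ)^(k.toNat) ≤ (p:ℚ) := by exact_mod_cast hle
      rw [h2] at h'
      linarith
    · intro hle
      have h' : (q:ℚ) * (2:ℚ)^(k.toNat) ≤ (p:ℚ) := by rw [h2]; linarith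
      exact_mod_cast h'
  · rw [if_neg hk, decide_eq_true_iff]
    have hnk : 0 ≤ -k := by omega
    have h2 : ((2:ℚ))^((-k).toNat) = (2:ℚ)^(-k : Int) := by
      rw [← zpow_natCast (2:ℚ) (-k).toNat, Int.toNat_of_nonneg hnk]
    have h2pos : (0:ℚ) < ((2:ℚ))^(-k : Int) := by positivity
    have hmul : (2:ℚ)^k * (2:ℚ)^(-k : Int) = 1 := by
      rw [← zpow_add₀ (by norm_num : (2:ℚ) ≠ 0)]; simp
    constructor
    · intro hle
      have hle' : (q:ℚ) ≤ (p:ℚ) * (2:ℚ)^(-k : Int) := by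
        have := (by exact_mod_cast hle : (q:ℚ) ≤ (p:ℚ) * (2:ℚ)^((-k).toNat))
        rwa [h2] at this
      rw [le_div_iff₀ hqpos]
      calc (2:ℚ)^k * (q:ℚ) ≤ (2:ℚ)^k * ((p:ℚ) * (2:ℚ)^(-k : Int)) := by
            apply mul_le_mul_of_nonneg_left hle' (by positivity)
        _ = (p:ℚ) * ((2:ℚ)^k * (2:ℚ)^(-k : Int)) := by ring
        _ = (p:ℚ) := by rw [hmul]; ring
    · intro hle
      rw [le_div_iff₀ hqpos] at hle
      have h' : (q:ℚ) ≤ (p:ℚ) * (2:ℚ)^(-k : Int) := by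
        calc (q:ℚ) = ((2:ℚ)^k * (q:ℚ)) * (2:ℚ)^(-k : Int) := by
              rw [show (2:ℚ)^k * (q:ℚ) * (2:ℚ)^(-k : Int) = (q:ℚ) * ((2:ℚ)^k * (2:ℚ)^(-k : Int)) by ring, hmul]; ring
          _ ≤ (p:ℚ) * (2:ℚ)^(-k : Int) := by
              apply mul_le_mul_of_nonneg_right hle (le_of_lt h2pos)
      rw [← h2] at h'
      exact_mod_cast h'

lemma pv_num_div_den (m : ℚ) (hm : 0 < m) : ((m.num.natAbs : ℚ))/((m.den : ℚ)) = m := by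
  have hnn : 0 ≤ m.num := le_of_lt (Rat.num_pos.mpr hm)
  conv_rhs => rw [← Rat.num_div_den m]
  congr 1
  have h1 : ((m.num.natAbs : ℕ) : ℚ) = ((|m.num| : ℤ) : ℚ) := Nat.cast_natAbs (α := ℚ) m.num
  rw [h1, abs_of_nonneg hnn]

lemma pv_exp_eq (m : ℚ) (hm : 0 < m) : pvExpB m.num.natAbs m.den = pvExpA m := by
  have hp : m.num.natAbs ≠ 0 := Int.natAbs_ne_zero.mpr (Rat.num_ne_zero.mpr (ne_of_gt hm))
  have hq : m.den ≠ 0 := m.den_nz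
  have hmm : ((m.num.natAbs : ℚ))/((m.den : ℚ)) = m := pv_num_div_den m hm
  have hlt := pv_lt_two_pow m.num.natAbs m.den hp hq
  rw [hmm] at hlt
  have htest := pv_test_iff m.num.natAbs m.den hp hq ((Nat.log2 m.num.natAbs : Int) - (Nat.log2 m.den : Int))
  rw [hmm] at htest
  unfold pvExpA pvExpB
  rw [if_neg (not_le.mpr hlt)]
  by_cases h2 : (2:ℚ)^((Nat.log2 m.num.natAbs : Int) - (Nat.log2 m.den : Int)) ≤ m
  · rw [if_pos ((show pvTestB m.num.natAbs m.den = true from htest.mpr h2)), if_pos h2]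
  · rw [if_neg (show ¬ pvTestB m.num.natAbs m.den = true from fun hh => h2 (htest.mp hh)), if_neg h2]

lemma pv_denB_ne (p q : Nat) (hq : q ≠ 0) : pvDenB p q ≠ 0 := by
  unfold pvDenB
  split_ifs <;> positivity

lemma pv_mant_eq (m : ℚ) (hm : 0 < m) : (pvMantB m.num.natAbs m.den : Int) = pvMantA m := by
  have hp : m.num.natAbs ≠ 0 := Int.natAbs_ne_zero.mpr (Rat.num_ne_zero.mpr (ne_of_gt hm))
  have hq : m.den ≠ 0 := m.den_nz
  have hmm : ((m.num.natAbs : ℚ))/((m.den : ℚ)) = m := pv_num_div_den m hm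
  have hden := pv_denB_ne m.num.natAbs m.den hq
  have ht : m * (2:ℚ)^(52 - pvExpB m.num.natAbs m.den)
      = ((pvNumB m.num.natAbs m.den : ℚ))/((pvDenB m.num.natAbs m.den : ℚ)) := by
    unfold pvNumB pvDenB
    rw [pv_scale_eq m.num.natAbs m.den hp hq (52 - pvExpB m.num.natAbs m.den), hmm]
  unfold pvMantA
  dsimp only
  rw [← pv_exp_eq m hm, ht, ← pv_round_nat (pvNumB m.num.natAbs m.den) (pvDenB m.num.natAbs m.den) hden]
  rfl

lemma pvRndB_eq_pvRound64 (x : ℚ) : pvRndB x = pvRound64 x := by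
  by_cases hx : x = 0
  · simp [pvRndB, pvRound64, hx]
  · unfold pvRndB pvRound64
    rw [if_neg hx, if_neg hx]
    dsimp only
    have hm : 0 < |x| := abs_pos.mpr hx
    have hnum : x.num.natAbs = |x|.num.natAbs := by
      rw [Rat.num_abs_eq_abs_num, Int.abs_eq_natAbs, Int.natAbs_natCast]
    have hden : x.den = |x|.den := (Rat.den_abs_eq_den x).symm
    rw [hnum, hden, pv_exp_eq |x| hm]
    have hmq : ((pvMantB (|x|).num.natAbs (|x|).den : Nat) : ℚ) = ((pvMantA |x| : Int) : ℚ) := by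
      exact_mod_cast congrArg (Int.cast : Int → ℚ) (pv_mant_eq |x| hm)
    rw [hmq]
    split_ifs <;> ring

lemma pvCutB_eq_pvFoldBound (L nb w : Int) : pvCutB L nb w = pvFoldBound L nb w := by
  unfold pvCutB pvFoldBound
  rw [pvRndB_eq_pvRound64, pvRndB_eq_pvRound64]

-- filtering the index range by "i < a or b ≤ i" and reading back the elements
-- is the concatenation of the two slices take a / drop b (a ≤ b)
lemma pv_filter_range_map_getD {α : Type} (d : List α) (dflt : α) (a b : Nat) (hab : a ≤ b) :
    ((List.range d.length).filter (fun i => decide (i < a ∨ b ≤ i))).map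
        (fun i => d.getD i dflt)
      = d.take a ++ d.drop b := by
  induction d using List.reverseRecOn with
  | nil => simp
  | append_singleton d x ih =>
    have hmap : ∀ i ∈ (List.range d.length).filter (fun i => decide (i < a ∨ b ≤ i)),
        (d ++ [x]).getD i dflt = d.getD i dflt := by
      intro i hi
      have hlt : i < d.length := List.mem_range.mp (List.mem_filter.mp hi).1
      simp [List.getD, List.getElem?_append_left hlt]
    rw [List.length_append, List.length_singleton, List.range_succ, List.filter_append,
        List.map_append, List.map_congr_left hmap, ih]
    have hx : (d ++ [x]).getD d.length dflt = x := by
      simp [List.getD]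
    by_cases h1 : d.length < a
    · have hc : (decide (d.length < a ∨ b ≤ d.length)) = true := by
        simp; omega
      have hb : d.length + 1 ≤ b := by omega
      simp only [List.filter_singleton, hc, cond_true]
      have t1 : List.take a (d ++ [x]) = d ++ [x] := List.take_of_length_le (by simp; omega)
      have t2 : List.take a d = d := List.take_of_length_le (by omega)
      have t3 : List.drop b d = ([] : List α) := List.drop_eq_nil_of_le (by omega)
      have t4 : List.drop b (d ++ [x]) = ([] : List α) := List.drop_eq_nil_of_le (by simp; omega)
      rw [List.map_singleton, hx, t1, t2, t3, t4]
      simp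
    · by_cases h2 : b ≤ d.length
      · have hc : (decide (d.length < a ∨ b ≤ d.length)) = true := by simp; omega
        simp only [List.filter_singleton, hc, cond_true]
        rw [List.map_singleton, hx,
            List.take_append_of_le_length (by omega : a ≤ d.length),
            List.drop_append_of_le_length h2]
        simp
      · have hc : (decide (d.length < a ∨ b ≤ d.length)) = false := by simp; omega
        simp only [List.filter_singleton, hc, cond_false]
        rw [List.take_append_of_le_length (by omega : a ≤ d.length),
            List.drop_eq_nil_of_le (by omega : b ≥ d.length),
            List.drop_eq_nil_of_le (by simp; omega)]
        simp

-- the strict float comparisons against lo/hi are the integer cut-point tests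
lemma pv_cond_iff (lo hi : ℚ) (i : Nat) :
    ((i:ℚ) < lo ∨ (i:ℚ) > hi) ↔
      (i < (max 0 ⌈lo⌉).toNat ∨ (max (max 0 ⌈lo⌉) (⌊hi⌋ + 1)).toNat ≤ i) := by
  have h1 : (i:ℚ) < lo ↔ (i:Int) < ⌈lo⌉ := by
    rw [Int.lt_ceil]; norm_cast
  have h2 : hi < (i:ℚ) ↔ ⌊hi⌋ < (i:Int) := by
    rw [Int.floor_lt]; norm_cast
  rw [gt_iff_lt, h1, h2]
  omega

-- ===== VERDICT (by name: the statement is the Claim_ definition above) =====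
theorem separationBaseApprentissageFolds_spec : Claim_equal_separationBaseApprentissageFolds := by
  intro d v nb _ _
  unfold Spec_separationBaseApprentissageFolds
  unfold separationBaseApprentissageFolds separationBaseApprentissageFolds_alt
  dsimp only
  rw [pvCutB_eq_pvFoldBound, pvCutB_eq_pvFoldBound]
  set lo : ℚ := pvFoldBound d.length nb v with hlo
  set hi : ℚ := pvFoldBound d.length nb (v + 1) with hhi
  rw [PySem.List.foldl_append_ite, List.nil_append]
  have ha : (0:Int) ≤ max 0 ⌈lo⌉ := le_max_left _ _
  have hb : (0:Int) ≤ max (max 0 ⌈lo⌉) (⌊hi⌋ + 1) := le_trans ha (le_max_left _ _)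
  rw [PySem.List.slice_to _ ha, PySem.List.slice_from _ hb]
  rw [List.filter_congr (fun i _ => decide_eq_decide.mpr (pv_cond_iff lo hi i))]
  exact pv_filter_range_map_getD d [] _ _ (by omega)
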